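-- pv_equiv track=rewrite | github.com/ntcqwq/kitchen | CCC/2011/ccc11s3.py | rec
-- ===== SOURCE A (Python) =====
-- goodl = [[1,0], [2,0], [3,0], [2,1]]
--
-- recl = [[1,1], [2,2], [3,1]]
--
-- def rec(m, x, y):
-- 	if m == 1:
-- 		if [x, y] in goodl:
-- 			return True
-- 		else:
-- 			return False
-- 	size = 5 ** (m-1)
-- 	x1 = x // size
-- 	y1 = y // size
-- 	if [x1, y1] in goodl:
-- 		return True
-- 	elif [x1, y1] in recl:
-- 		return (rec(m-1, x % size, y % size))
-- 	else:
-- 		return False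
-- ===== SOURCE B (Python) =====
-- goodl = [[1,0], [2,0], [3,0], [2,1]]
--
-- recl = [[1,1], [2,2], [3,1]]
--
-- def rec(m, x, y):
--     while m > 1:
--         size = 5 ** (m - 1)
--         d = [x // size, y // size]
--         if d in goodl:
--             return True
--         if d not in recl:
--             return False
--         m, x, y = m - 1, x % size, y % size
--     return [x, y] in goodl
-- ===== Notes on version B (the rewrite author's own statement) =====
-- stated objective: alternative
-- what changed: The call-stack recursion over digit levels is replaced by an explicit while-loop that keeps the running level and coordinates (m, x, y) as loop state.
-- outside the precondition, e.g. on rec(0, 1, 0): A returns False, B returns True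
import Mathlib
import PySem

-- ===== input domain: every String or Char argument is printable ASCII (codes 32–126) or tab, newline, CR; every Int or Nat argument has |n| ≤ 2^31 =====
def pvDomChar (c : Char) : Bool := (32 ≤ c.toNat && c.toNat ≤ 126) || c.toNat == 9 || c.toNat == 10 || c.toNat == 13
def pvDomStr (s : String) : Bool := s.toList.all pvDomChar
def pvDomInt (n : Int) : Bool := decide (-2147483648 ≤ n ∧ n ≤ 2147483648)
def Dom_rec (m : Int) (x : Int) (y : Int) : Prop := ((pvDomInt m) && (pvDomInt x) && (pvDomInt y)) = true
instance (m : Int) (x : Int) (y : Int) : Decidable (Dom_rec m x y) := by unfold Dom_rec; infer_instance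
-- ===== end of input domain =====

-- B replaces the call-stack recursion by an explicit loop maintaining (m, x, y); return value equivalence.

-- ===== PORT A =====
def goodlA : List (Int × Int) := [(1,0), (2,0), (3,0), (2,1)]
def reclA : List (Int × Int) := [(1,1), (2,2), (3,1)]

-- fuel = m.toNat only makes the recursion total; on every input with m ≥ 1 the fuel never runs out
def recFuelA : Nat → Int → Int → Int → Bool
  | 0, _, _, _ => false
  | fuel+1, m, x, y =>
    if m = 1 then decide ((x, y) ∈ goodlA)
    else
      let size : Int := 5 ^ (m - 1).toNat
      let x1 := PySem.Int.floordiv x size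
      let y1 := PySem.Int.floordiv y size
      if (x1, y1) ∈ goodlA then true
      else if (x1, y1) ∈ reclA then recFuelA fuel (m - 1) (PySem.Int.mod x size) (PySem.Int.mod y size)
      else false

def rec (m : Int) (x : Int) (y : Int) : Bool := recFuelA m.toNat m x y

-- ===== PORT B =====
def goodlB : List (Int × Int) := [(1,0), (2,0), (3,0), (2,1)]
def reclB : List (Int × Int) := [(1,1), (2,2), (3,1)]

def rec_alt (m : Int) (x : Int) (y : Int) : Bool :=
  if h : 1 < m then
    let size : Int := 5 ^ (m - 1).toNat
    let d := (PySem.Int.floordiv x size, PySem.Int.floordiv y size)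
    if d ∈ goodlB then true
    else if d ∉ reclB then false
    else rec_alt (m - 1) (PySem.Int.mod x size) (PySem.Int.mod y size)
  else decide ((x, y) ∈ goodlB)
termination_by (m - 1).toNat
decreasing_by omega

-- ===== PRECONDITION & SPEC =====
-- Pre_ excludes m ≤ 0, where Python's `5 ** (m-1)` is a FLOAT, so A's quotients/remainders are
-- float values (outside the int convention, unportable) and the recursion can be unbounded.
def Pre_rec (m : Int) (x : Int) (y : Int) : Prop := 1 ≤ m
instance (m : Int) (x : Int) (y : Int) : Decidable (Pre_rec m x y) := by unfold Pre_rec; infer_instance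
def pvWitness_rec : Int × Int × Int := (2, 7, 1)

def Spec_rec (m : Int) (x : Int) (y : Int) (out : Bool) : Prop := out = rec_alt m x y
instance (m : Int) (x : Int) (y : Int) (out : Bool) : Decidable (Spec_rec m x y out) := by unfold Spec_rec; infer_instance

-- ===== CLAIM (what is proved, stated in full; the proofs are below) =====
def Claim_equal_rec : Prop := ∀ (m : Int) (x : Int) (y : Int), Dom_rec m x y → Pre_rec m x y → Spec_rec m x y (rec m x y)

-- ===== LEMMAS AND PROOFS =====
lemma recFuelA_eq_alt : ∀ (fuel : Nat) (m x y : Int), 1 ≤ m → m ≤ (fuel : Int) →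
    recFuelA fuel m x y = rec_alt m x y := by
  intro fuel
  induction fuel with
  | zero => intro m x y h1 h2; exact absurd h1 (by push_cast at h2; omega)
  | succ n ih =>
    intro m x y h1 h2
    by_cases hm : m = 1
    · subst hm
      rw [rec_alt.eq_def]
      simp [recFuelA, goodlA, goodlB]
    · have hm1 : 1 < m := by omega
      rw [rec_alt.eq_def, recFuelA]
      simp only [hm, if_false, dif_pos hm1]
      have : goodlB = goodlA := rfl
      rw [this]
      have : reclB = reclA := rfl
      rw [this]
      have hrec := ih (m-1) (PySem.Int.mod x (5 ^ (m - 1).toNat)) (PySem.Int.mod y (5 ^ (m - 1).toNat)) (by omega) (by push_cast at h2 ⊢; omega)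
      simp [PySem.Int.floordiv, PySem.Int.mod] at hrec ⊢
      rw [hrec]

-- ===== VERDICT (by name: the statement is the Claim_ definition above) =====
theorem rec_spec : Claim_equal_rec := by
  intro m x y _ hpre
  unfold Spec_rec rec
  exact recFuelA_eq_alt m.toNat m x y hpre (by omega)
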